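-- pv_equiv track=rewrite | github.com/anothel/CodeKata | 백준/Bronze/2810. 컵홀더/컵홀더.py | drawSeat
-- ===== SOURCE A (Python) =====
-- def drawSeat(seat: str) -> str:
--     holder: str = ''
--     isL: bool = False
--     for i in seat:
--         if isL == False:
--             holder += '*'
--             holder += i
--             if i == 'L':
--                 isL = True
--         else:
--             holder += i
--             isL = False
--     holder += '*'
--
--     return holder
-- ===== SOURCE B (Python) =====
-- def drawSeat(seat: str) -> str:
--     segments = []
--     i = 0
--     while i < len(seat):
--         if seat[i] == 'L':
--             segments.append(seat[i:i+2])
--             i += 2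
--         else:
--             segments.append(seat[i])
--             i += 1
--     return '*' + ''.join(seg + '*' for seg in segments)
-- ===== Notes on version B (the rewrite author's own statement) =====
-- stated objective: alternative
-- what changed: B drops A's boolean pair-in-progress flag: it walks the string with a variable-step index cutting it into greedy chunks (two characters when a pair starts, one otherwise) and assembles the result as a star prefix plus each chunk followed by a star.
import Mathlib
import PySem

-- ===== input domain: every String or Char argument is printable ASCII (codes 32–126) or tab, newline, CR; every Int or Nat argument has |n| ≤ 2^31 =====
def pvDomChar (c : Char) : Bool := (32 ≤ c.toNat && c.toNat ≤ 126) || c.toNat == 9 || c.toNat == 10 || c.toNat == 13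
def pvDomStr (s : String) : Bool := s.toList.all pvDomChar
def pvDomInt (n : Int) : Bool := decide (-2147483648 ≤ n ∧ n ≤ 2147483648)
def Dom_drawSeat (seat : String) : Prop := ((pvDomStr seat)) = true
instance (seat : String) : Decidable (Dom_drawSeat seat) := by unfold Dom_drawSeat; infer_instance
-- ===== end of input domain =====

-- B replaces A's flag-driven per-character scan by a greedy variable-step chunk decomposition; same return value (alternative decomposition, no speed claim).
-- ===== PORT A =====
-- one step of A's for-loop: state = (holder, isL)
def pvStepA (st : List Char × Bool) (i : Char) : List Char × Bool :=
  if st.2 = false then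
    (st.1 ++ ['*'] ++ [i], if i = 'L' then true else st.2)
  else
    (st.1 ++ [i], false)

def drawSeat (seat : String) : String :=
  String.mk ((seat.toList.foldl pvStepA ([], false)).1 ++ ['*'])

-- ===== PORT B =====
-- the greedy chunks of Source B's while loop: 2 chars from each 'L', else 1 char
def pvChunks : List Char → List (List Char)
  | [] => []
  | c :: rest =>
    if c = 'L' then
      match rest with
      | [] => [[c]]
      | d :: r => [c, d] :: pvChunks r
    else [c] :: pvChunks rest

def drawSeat_alt (seat : String) : String :=
  String.mk ('*' :: ((pvChunks seat.toList).map (· ++ ['*'])).flatten)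

-- ===== PRECONDITION & SPEC =====
def Spec_drawSeat (seat : String) (out : String) : Prop := out = drawSeat_alt seat
instance (seat : String) (out : String) : Decidable (Spec_drawSeat seat out) := by unfold Spec_drawSeat; infer_instance

-- ===== CLAIM (what is proved, stated in full; the proofs are below) =====
def Claim_equal_drawSeat : Prop := ∀ (seat : String), Dom_drawSeat seat → Spec_drawSeat seat (drawSeat seat)

-- ===== LEMMAS AND PROOFS =====
-- loop invariant: A's fold from (h, false), with the final '*' appended, equals h then '*' then B's chunk assembly
theorem pvFold_eq_chunks : ∀ (l : List Char) (h : List Char),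
    (l.foldl pvStepA (h, false)).1 ++ ['*'] =
      h ++ '*' :: ((pvChunks l).map (· ++ ['*'])).flatten := by
  intro l
  induction l using pvChunks.induct with
  | case1 => intro h; simp [pvChunks]
  | case2 => intro h; simp [pvChunks, pvStepA]
  | case3 d r ih =>
      intro h
      simp only [List.foldl, pvStepA]
      simpa [pvChunks, List.append_assoc] using ih (h ++ ['*'] ++ ['L'] ++ [d])
  | case4 c rest hc ih =>
      intro h
      have hch : pvChunks (c :: rest) = [c] :: pvChunks rest := by
        conv_lhs => rw [pvChunks.eq_def]
        simp only []; rw [if_neg hc]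
      simp only [List.foldl, pvStepA, if_neg hc, hch]
      simpa [List.append_assoc] using ih (h ++ ['*'] ++ [c])

-- ===== VERDICT (by name: the statement is the Claim_ definition above) =====
theorem drawSeat_spec : Claim_equal_drawSeat := by
  intro seat _
  unfold Spec_drawSeat drawSeat drawSeat_alt
  rw [pvFold_eq_chunks]
  rfl
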